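-- pv_equiv track=rewrite | github.com/CTISM-Prof-Henry/python-two-torturador-de-mentes | project/tarefa_05.py | tarefa_5
-- ===== SOURCE A (Python) =====
-- def tarefa_5(x):
--     if x <= 0:
--         return 1
--
--     if x == 1:
--         return 0
--
--     if x == 2:
--         return 1
--
--     return 1 + tarefa_5(x // 2)
-- ===== SOURCE B (Python) =====
-- def tarefa_5(x):
--     count = 0
--     while not (x <= 0 or x == 1 or x == 2):
--         x = x // 2
--         count += 1
--     if x <= 0:
--         return count + 1
--     if x == 1:
--         return count
--     return count + 1
-- ===== Notes on version B (the rewrite author's own statement) =====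
-- stated objective: simpler
-- what changed: Replaced the recursion with an iterative while-loop carrying an explicit counter, applying the base-case mapping once after the loop.
import Mathlib
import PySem

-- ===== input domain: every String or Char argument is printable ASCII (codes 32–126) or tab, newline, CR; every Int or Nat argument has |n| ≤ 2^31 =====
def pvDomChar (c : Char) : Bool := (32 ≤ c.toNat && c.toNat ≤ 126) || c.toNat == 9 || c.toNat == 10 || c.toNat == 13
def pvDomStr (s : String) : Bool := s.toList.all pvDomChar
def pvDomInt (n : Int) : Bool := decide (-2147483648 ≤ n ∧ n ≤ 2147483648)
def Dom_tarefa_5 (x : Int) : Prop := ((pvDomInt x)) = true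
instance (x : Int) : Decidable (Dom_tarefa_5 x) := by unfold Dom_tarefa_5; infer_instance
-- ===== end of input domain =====

-- B replaces the recursion by an iterative halving loop with an explicit counter (simpler, constant stack).

theorem pvHalf_lt (x : Int) (h0 : ¬ x ≤ 0) (h1 : ¬ x = 1) (h2 : ¬ x = 2) :
    (PySem.Int.floordiv x 2).toNat < x.toNat := by
  have hx : 3 ≤ x := by omega
  have : PySem.Int.floordiv x 2 = x / 2 := by
    simp [PySem.Int.floordiv, Int.fdiv_eq_ediv]
  rw [this]
  omega

-- ===== PORT A =====
def tarefa_5 (x : Int) : Int :=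
  if x ≤ 0 then 1
  else if x = 1 then 0
  else if x = 2 then 1
  else 1 + tarefa_5 (PySem.Int.floordiv x 2)
termination_by x.toNat
decreasing_by exact pvHalf_lt x ‹_› ‹_› ‹_›

-- ===== PORT B =====
-- the while-loop: returns (final x, final count)
def tarefa5Loop (x : Int) (count : Int) : Int × Int :=
  if h : ¬ (x ≤ 0 ∨ x = 1 ∨ x = 2) then
    tarefa5Loop (PySem.Int.floordiv x 2) (count + 1)
  else (x, count)
termination_by x.toNat
decreasing_by exact pvHalf_lt x (by tauto) (by tauto) (by tauto)

def tarefa_5_alt (x : Int) : Int :=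
  let r := tarefa5Loop x 0
  if r.1 ≤ 0 then r.2 + 1
  else if r.1 = 1 then r.2
  else r.2 + 1

-- ===== PRECONDITION & SPEC =====
def Spec_tarefa_5 (x : Int) (out : Int) : Prop := out = tarefa_5_alt x
instance (x : Int) (out : Int) : Decidable (Spec_tarefa_5 x out) := by unfold Spec_tarefa_5; infer_instance

-- ===== CLAIM (what is proved, stated in full; the proofs are below) =====
def Claim_equal_tarefa_5 : Prop := ∀ (x : Int), Dom_tarefa_5 x → Spec_tarefa_5 x (tarefa_5 x)

-- ===== LEMMAS AND PROOFS =====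

-- value extracted from the loop's final state, exactly as tarefa_5_alt does after the loop
def tarefa5Fin (r : Int × Int) : Int :=
  if r.1 ≤ 0 then r.2 + 1 else if r.1 = 1 then r.2 else r.2 + 1

theorem tarefa5Loop_fin (x : Int) : ∀ (c : Int),
    tarefa5Fin (tarefa5Loop x c) = c + tarefa_5 x := by
  induction x using tarefa_5.induct with
  | case1 x h =>
    intro c
    rw [tarefa5Loop, tarefa_5]
    simp [h, tarefa5Fin]
  | case2 h =>
    intro c
    rw [tarefa5Loop, tarefa_5]
    simp [tarefa5Fin]
  | case3 h h1 =>
    intro c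
    rw [tarefa5Loop, tarefa_5]
    simp [tarefa5Fin]
  | case4 x h h1 h2 ih =>
    intro c
    rw [tarefa5Loop, tarefa_5]
    simp only [h, h1, h2, or_self, if_neg, dif_pos, not_false_iff]
    rw [ih]
    ring

-- ===== VERDICT (by name: the statement is the Claim_ definition above) =====
theorem tarefa_5_spec : Claim_equal_tarefa_5 := by
  intro x _
  unfold Spec_tarefa_5 tarefa_5_alt
  have := tarefa5Loop_fin x 0
  simp [tarefa5Fin] at this
  simp only []
  split_ifs with h1 h2 <;> simp_all
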